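-- pv_equiv track=rewrite | github.com/ampproject/amp.dev | pages/extensions/amp_dev/markdown_extras/skcode/tokenizer.py | tokenize_newline
-- ===== SOURCE A (Python) =====
-- TOKEN_DATA = 0
--
-- TOKEN_NEWLINE = 1
--
-- def tokenize_newline(data):
--     u"""
--     Given a string that does not contain any tags, this function will
--     yield a list of ``TOKEN_NEWLINE`` and ``TOKEN_DATA`` tokens in such way
--     that if you concatenate their data, you will have the original string.
--     N.B. Newline must have been normalized to ``\n`` before calling this function.
--     :param data: Input data string to be tokenize.
--     """
--     lines = data.split(u'\n')
--     last_line = lines.pop()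
--     for line in lines:
--         if line:
--             yield TOKEN_DATA, None, None, line
--         yield TOKEN_NEWLINE, None, None, u'\n'
--
--     if last_line:
--         yield TOKEN_DATA, None, None, last_line
-- ===== SOURCE B (Python) =====
-- TOKEN_DATA = 0
--
-- TOKEN_NEWLINE = 1
--
-- def tokenize_newline(data):
--     buf = []
--     for ch in data:
--         if ch == '\n':
--             if buf:
--                 yield TOKEN_DATA, None, None, ''.join(buf)
--             yield TOKEN_NEWLINE, None, None, '\n'
--             buf = []
--         else:
--             buf.append(ch)
--     if buf:
--         yield TOKEN_DATA, None, None, ''.join(buf)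
-- ===== Notes on version B (the rewrite author's own statement) =====
-- stated objective: alternative
-- what changed: Replaces split-on-newline + pop-last + loop over the pieces with a single left-to-right scan over the characters that maintains a buffer and emits DATA/NEWLINE tokens incrementally.
import Mathlib
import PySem

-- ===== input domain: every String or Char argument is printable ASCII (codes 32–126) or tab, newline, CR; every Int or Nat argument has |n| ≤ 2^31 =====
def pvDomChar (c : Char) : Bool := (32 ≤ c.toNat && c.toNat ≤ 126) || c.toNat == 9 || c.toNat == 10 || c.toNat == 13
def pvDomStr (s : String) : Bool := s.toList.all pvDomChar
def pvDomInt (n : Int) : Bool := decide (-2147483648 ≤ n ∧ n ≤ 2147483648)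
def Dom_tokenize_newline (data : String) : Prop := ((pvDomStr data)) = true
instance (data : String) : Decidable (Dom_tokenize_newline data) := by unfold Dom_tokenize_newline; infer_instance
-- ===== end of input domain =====

-- B replaces A's split-then-loop with a single-pass scanner over the characters
-- that maintains a buffer and emits tokens as it goes (objective: alternative decomposition, same cost).

-- ===== PORT A =====
-- A: split on '\n', pop the last piece, loop over the rest, then emit the last piece.
def tokenize_newline (data : String) : List (Int × Option String × Option String × String) :=
  -- data.split('\n'): exact — PySem.Str.split? with the non-empty separator "\n" is
  -- (Chars.splitOn … ).map String.ofList by definition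
  let lines := (PySem.Chars.splitOn data.toList ['\n']).map String.ofList
  match PySem.List.pop? lines with
  | none => []  -- unreachable: split always returns at least one piece
  | some (last_line, rest) =>
      rest.foldl (fun acc line =>
        (acc ++ (if line ≠ "" then [((0 : Int), (none : Option String), (none : Option String), line)] else []))
          ++ [((1 : Int), (none : Option String), (none : Option String), "\n")]) []
      ++ (if last_line ≠ "" then [((0 : Int), (none : Option String), (none : Option String), last_line)] else [])

-- ===== PORT B =====
-- B: one pass over the characters with a buffer (Source B's loop, buffer kept in order; ''.join(buf) = String.ofList buf).
def tokenizeScan (buf : List Char) : List Char → List (Int × Option String × Option String × String)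
  | [] =>
      if buf ≠ [] then [((0 : Int), (none : Option String), (none : Option String), String.ofList buf)] else []
  | c :: rest =>
      if c = '\n' then
        (if buf ≠ [] then [((0 : Int), (none : Option String), (none : Option String), String.ofList buf)] else [])
          ++ ((1 : Int), (none : Option String), (none : Option String), "\n") :: tokenizeScan [] rest
      else tokenizeScan (buf ++ [c]) rest

def tokenize_newline_alt (data : String) : List (Int × Option String × Option String × String) :=
  tokenizeScan [] data.toList

-- ===== PRECONDITION & SPEC =====
def Spec_tokenize_newline (data : String) (out : List (Int × Option String × Option String × String)) : Prop := out = tokenize_newline_alt data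
instance (data : String) (out : List (Int × Option String × Option String × String)) : Decidable (Spec_tokenize_newline data out) := by unfold Spec_tokenize_newline; infer_instance

-- ===== CLAIM (what is proved, stated in full; the proofs are below) =====
def Claim_equal_tokenize_newline : Prop := ∀ (data : String), Dom_tokenize_newline data → Spec_tokenize_newline data (tokenize_newline data)

-- ===== LEMMAS AND PROOFS =====

-- Proof-side characterisation of splitOn on the single-char separator '\n',
-- with the current piece kept in order (like B's buffer).
def nlParts (cur : List Char) : List Char → List (List Char)
  | [] => [cur]
  | c :: rest => if c = '\n' then cur :: nlParts [] rest else nlParts (cur ++ [c]) rest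

theorem nlParts_ne_nil (cur l : List Char) : nlParts cur l ≠ [] := by
  cases l with
  | nil => simp [nlParts]
  | cons c rest => simp only [nlParts]; split <;> simp [nlParts_ne_nil]

-- go with enough fuel computes acc.reverse ++ nlParts cur.reverse l (pieces in order)
theorem go_eq_nlParts (l : List Char) : ∀ (fuel : Nat), l.length < fuel →
    ∀ (cur : List Char) (acc : List (List Char)),
      PySem.Chars.splitOn.go ['\n'] fuel l cur acc = acc.reverse ++ nlParts cur.reverse l := by
  induction l with
  | nil =>
      intro fuel hf cur acc
      cases fuel with
      | zero => omega
      | succ n => simp [PySem.Chars.splitOn.go, nlParts]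
  | cons c rest ih =>
      intro fuel hf cur acc
      cases fuel with
      | zero => simp at hf
      | succ n =>
        by_cases hc : c = '\n'
        · subst hc
          have hpre : List.isPrefixOf ['\n'] ('\n' :: rest) = true := by simp [List.isPrefixOf]
          simp only [PySem.Chars.splitOn.go, hpre, if_pos, nlParts]
          rw [show List.drop ['\n'].length ('\n' :: rest) = rest from rfl,
              ih n (by simpa using hf) [] (cur.reverse :: acc)]
          simp
        · have hpre : List.isPrefixOf ['\n'] (c :: rest) = false := by
            simp [List.isPrefixOf]
            exact fun h => absurd h.symm hc
          simp only [PySem.Chars.splitOn.go, hpre, Bool.false_eq_true, if_false, nlParts, if_neg hc]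
          rw [ih n (by simpa using hf) (c :: cur) acc]
          simp

theorem splitOn_eq_nlParts (l : List Char) :
    PySem.Chars.splitOn l ['\n'] = nlParts [] l := by
  have h := go_eq_nlParts l (l.length + 1) (by omega) [] []
  simpa [PySem.Chars.splitOn] using h

-- A's post-split body, phrased as a recursion over the list of pieces (char-list level).
def emitLines : List (List Char) → List (Int × Option String × Option String × String)
  | [] => []
  | [last] =>
      if last ≠ [] then [((0 : Int), (none : Option String), (none : Option String), String.ofList last)] else []
  | line :: rest =>
      (if line ≠ [] then [((0 : Int), (none : Option String), (none : Option String), String.ofList line)] else [])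
        ++ ((1 : Int), (none : Option String), (none : Option String), "\n") :: emitLines rest

-- B's scanner computes emitLines of the pieces
theorem tokenizeScan_eq_emitLines (l : List Char) : ∀ (buf : List Char),
    tokenizeScan buf l = emitLines (nlParts buf l) := by
  induction l with
  | nil => intro buf; simp [tokenizeScan, nlParts, emitLines]
  | cons c rest ih =>
      intro buf
      by_cases hc : c = '\n'
      · subst hc
        simp only [tokenizeScan, nlParts]
        obtain ⟨p, ps, hps⟩ : ∃ p ps, nlParts ([] : List Char) rest = p :: ps := by
          cases h : nlParts ([] : List Char) rest with
          | nil => exact absurd h (nlParts_ne_nil _ _)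
          | cons p ps => exact ⟨p, ps, rfl⟩
        rw [ih []]
        simp [hps, emitLines]
      · simp only [tokenizeScan, nlParts, if_neg hc]
        exact ih (buf ++ [c])

-- A's foldl with a general accumulator
theorem foldlA_acc (lines : List String) (acc : List (Int × Option String × Option String × String)) :
    lines.foldl (fun acc line =>
        (acc ++ (if line ≠ "" then [((0 : Int), (none : Option String), (none : Option String), line)] else []))
          ++ [((1 : Int), (none : Option String), (none : Option String), "\n")]) acc
    = acc ++ lines.foldl (fun acc line =>
        (acc ++ (if line ≠ "" then [((0 : Int), (none : Option String), (none : Option String), line)] else []))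
          ++ [((1 : Int), (none : Option String), (none : Option String), "\n")]) [] := by
  induction lines generalizing acc with
  | nil => simp
  | cons x xs ih =>
      simp only [List.foldl_cons]
      rw [ih, ih ((([] ++ _) ++ _))]
      simp

-- A's whole body, applied to a non-empty list of char-list pieces, is emitLines
theorem A_body_eq_emitLines (ps : List (List Char)) (p : List Char) :
    (match PySem.List.pop? ((ps ++ [p]).map String.ofList) with
      | none => []
      | some (last_line, rest) =>
          rest.foldl (fun acc line =>
            (acc ++ (if line ≠ "" then [((0 : Int), (none : Option String), (none : Option String), line)] else []))
              ++ [((1 : Int), (none : Option String), (none : Option String), "\n")]) []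
          ++ (if last_line ≠ "" then [((0 : Int), (none : Option String), (none : Option String), last_line)] else []))
    = emitLines (ps ++ [p]) := by
  rw [List.map_append, List.map_singleton, PySem.List.pop?_last]
  induction ps with
  | nil => simp [emitLines, String.ofList_eq_empty_iff]
  | cons q qs ih =>
      simp only [List.map_cons, List.foldl_cons]
      rw [foldlA_acc]
      have hrest : qs ++ [p] ≠ [] := by simp
      have : emitLines (q :: (qs ++ [p])) =
          (if q ≠ [] then [((0 : Int), (none : Option String), (none : Option String), String.ofList q)] else [])
            ++ ((1 : Int), (none : Option String), (none : Option String), "\n") :: emitLines (qs ++ [p]) := by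
        cases h : qs ++ [p] with
        | nil => exact absurd h hrest
        | cons r rs => simp [emitLines]
      rw [List.cons_append, this, ← ih]
      simp [String.ofList_eq_empty_iff]

-- ===== VERDICT (by name: the statement is the Claim_ definition above) =====
theorem tokenize_newline_spec : Claim_equal_tokenize_newline := by
  intro data _
  unfold Spec_tokenize_newline tokenize_newline tokenize_newline_alt
  rw [splitOn_eq_nlParts, tokenizeScan_eq_emitLines]
  obtain ⟨ps, p, hps⟩ : ∃ ps p, nlParts ([] : List Char) data.toList = ps ++ [p] := by
    cases h : nlParts ([] : List Char) data.toList with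
    | nil => exact absurd h (nlParts_ne_nil _ _)
    | cons q qs => exact ⟨(q :: qs).dropLast, (q :: qs).getLast (by simp), by
        simpa using (List.dropLast_append_getLast (l := q :: qs) (by simp)).symm⟩
  rw [hps]
  exact A_body_eq_emitLines ps p
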